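-- pv_equiv track=rewrite | github.com/dannguyen99/codewar_2019 | problem1.py | oddNumbers
-- ===== SOURCE A (Python) =====
-- def oddNumbers(s):
--     choices = 1
--     possible = 9
--     used = []
--     for i in range(len(s)):
--         if i == 0:
--             choices *= 5
--         elif s[-i -1] in used:
--             choices *= 1
--         else:
--             choices *= possible
--             possible -= 1
--         used.append(s[-i -1])
--     return choices
-- ===== SOURCE B (Python) =====
-- def oddNumbers(s):
--     distinct = len(set(s))
--     if distinct == 0:
--         return 1
--     result = 5
--     p = 9
--     for _ in range(distinct - 1):
--         result *= p
--         p -= 1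
--     return result
-- ===== Notes on version B (the rewrite author's own statement) =====
-- stated objective: faster
-- what changed: Replaces A's per-character reverse-indexed scan with a linear membership test against the growing seen-characters list by computing the distinct-character count once via set(s) and then running a single falling-factorial loop 5*9*8*... of length distinct-1.
import Mathlib
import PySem

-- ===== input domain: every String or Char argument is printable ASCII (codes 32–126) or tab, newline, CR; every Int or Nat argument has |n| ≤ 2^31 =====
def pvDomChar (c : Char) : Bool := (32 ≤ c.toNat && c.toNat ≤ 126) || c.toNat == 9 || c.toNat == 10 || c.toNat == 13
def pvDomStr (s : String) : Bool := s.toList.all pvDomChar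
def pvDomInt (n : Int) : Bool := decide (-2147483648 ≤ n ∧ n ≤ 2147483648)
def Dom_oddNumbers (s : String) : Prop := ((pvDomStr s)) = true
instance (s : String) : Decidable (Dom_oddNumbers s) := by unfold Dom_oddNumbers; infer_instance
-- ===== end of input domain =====

-- B replaces A's reverse-indexed scan with one distinct-count (set) and a short falling-factorial loop: faster (measured).

-- ===== PORT A =====
-- literal port of A: the loop body over state (choices, possible, used); s[-i-1] via pyGetD
-- (the index -i-1 is always in range for 0 ≤ i < len(s), so pyGetD is exact here)
def oddBodyA (cs : List Char) (st : Int × Int × List Char) (i : Int) : Int × Int × List Char :=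
  let c := PySem.List.pyGetD cs (-i - 1) ' '
  if i = 0 then (st.1 * 5, st.2.1, st.2.2 ++ [c])
  else if c ∈ st.2.2 then (st.1 * 1, st.2.1, st.2.2 ++ [c])
  else (st.1 * st.2.1, st.2.1 - 1, st.2.2 ++ [c])

def oddNumbers (s : String) : Int :=
  ((PySem.List.pyRange 0 (s.toList.length : Int) 1).foldl
    (oddBodyA s.toList) (1, 9, ([] : List Char))).1

-- ===== PORT B =====
-- literal port of Source B: distinct = len(set(s)); then result = 5, p = 9, loop distinct-1 times
def oddNumbers_alt (s : String) : Int :=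
  if ((PySem.Set.ofList s.toList).length : Int) = 0 then 1
  else ((PySem.List.pyRange 0 (((PySem.Set.ofList s.toList).length : Int) - 1) 1).foldl
         (fun (st : Int × Int) _ => (st.1 * st.2, st.2 - 1)) (5, 9)).1

-- ===== PRECONDITION & SPEC =====
def Spec_oddNumbers (s : String) (out : Int) : Prop := out = oddNumbers_alt s
instance (s : String) (out : Int) : Decidable (Spec_oddNumbers s out) := by unfold Spec_oddNumbers; infer_instance

-- ===== CLAIM (what is proved, stated in full; the proofs are below) =====
def Claim_equal_oddNumbers : Prop := ∀ (s : String), Dom_oddNumbers s → Spec_oddNumbers s (oddNumbers s)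

-- ===== LEMMAS AND PROOFS =====

-- falling factorial: ffall p k = p * (p-1) * … * (p-k+1)
def ffall : Int → Nat → Int
  | _, 0 => 1
  | p, (k+1) => p * ffall (p-1) k

theorem ffall_succ_right (p : Int) (k : Nat) : ffall p (k+1) = ffall p k * (p - k) := by
  induction k generalizing p with
  | zero => simp [ffall]
  | succ k ih =>
    show p * ffall (p-1) (k+1) = p * ffall (p-1) k * (p - (↑k + 1))
    rw [ih (p-1)]
    ring

-- A's loop body on iterations i ≥ 1, as a function of the character alone
def oddStep (st : Int × Int × List Char) (c : Char) : Int × Int × List Char :=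
  if c ∈ st.2.2 then (st.1 * 1, st.2.1, st.2.2 ++ [c])
  else (st.1 * st.2.1, st.2.1 - 1, st.2.2 ++ [c])

-- number of new distinct characters of l relative to accumulator u, mirroring the fold
def nd (u : List Char) : List Char → Nat
  | [] => 0
  | c :: t => if c ∈ u then nd (u ++ [c]) t else nd (u ++ [c]) t + 1

theorem foldl_oddStep (l : List Char) (ch p : Int) (u : List Char) :
    l.foldl oddStep (ch, p, u) = (ch * ffall p (nd u l), p - nd u l, u ++ l) := by
  induction l generalizing ch p u with
  | nil => simp [nd, ffall]
  | cons c t ih =>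
    rw [List.foldl_cons]
    by_cases hc : c ∈ u
    · rw [show oddStep (ch, p, u) c = (ch * 1, p, u ++ [c]) from by simp [oddStep, hc]]
      rw [ih, show nd u (c :: t) = nd (u ++ [c]) t from by simp [nd, hc]]
      simp
    · rw [show oddStep (ch, p, u) c = (ch * p, p - 1, u ++ [c]) from by simp [oddStep, hc]]
      rw [ih, show nd u (c :: t) = nd (u ++ [c]) t + 1 from by simp [nd, hc]]
      refine Prod.ext ?_ (Prod.ext ?_ ?_)
      · show ch * p * ffall (p - 1) (nd (u ++ [c]) t) = ch * ffall p (nd (u ++ [c]) t + 1)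
        simp [ffall]; ring
      · show p - 1 - (nd (u ++ [c]) t : Int) = p - ((nd (u ++ [c]) t + 1 : Nat) : Int)
        push_cast; ring
      · simp

theorem nd_card (l u : List Char) : nd u l + u.toFinset.card = (u ++ l).toFinset.card := by
  induction l generalizing u with
  | nil => simp [nd]
  | cons c t ih =>
    have assoc : u ++ c :: t = (u ++ [c]) ++ t := by simp
    by_cases hc : c ∈ u
    · have hfe : (u ++ [c]).toFinset = u.toFinset := by
        ext x; simp; rintro rfl; exact hc
      rw [nd, if_pos hc, assoc, ← ih (u ++ [c]), hfe]
    · have hfe : (u ++ [c]).toFinset.card = u.toFinset.card + 1 := by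
        have h : (u ++ [c]).toFinset = insert c u.toFinset := by
          ext x
          simp only [List.toFinset_append, Finset.mem_union, List.mem_toFinset, List.toFinset_cons,
            List.toFinset_nil, insert_empty_eq, Finset.mem_singleton, Finset.mem_insert]
          tauto
        rw [h, Finset.card_insert_of_notMem (by simpa using hc)]
      rw [nd, if_neg hc, assoc, ← ih (u ++ [c]), hfe]
      omega

theorem ofList_length_eq_card (xs : List Char) :
    (PySem.Set.ofList xs).length = xs.toFinset.card := by
  have h1 : (PySem.Set.ofList xs).toFinset = xs.toFinset := by
    ext x; simp [PySem.Set.mem_ofList]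
  rw [← h1, List.toFinset_card_of_nodup (PySem.Set.nodup_ofList xs)]

theorem foldl_range_prod (k : Nat) (r p : Int) :
    ((PySem.List.pyRange 0 (k : Int) 1).foldl
      (fun (st : Int × Int) _ => (st.1 * st.2, st.2 - 1)) (r, p))
      = (r * ffall p k, p - k) := by
  induction k generalizing r p with
  | zero => simp [ffall]
  | succ k ih =>
    have h : ((k + 1 : Nat) : Int) = ((k : Int) + 1) := by push_cast; ring
    rw [h, PySem.List.pyRange_one_succ_right (by positivity), List.foldl_append, ih]
    rw [List.foldl_cons, List.foldl_nil, ffall_succ_right]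
    refine Prod.ext (by ring) (by push_cast; ring)

-- s[-i-1] equals reversed(s)[i]
theorem pyGetD_neg_rev (cs : List Char) (i : Int) (h0 : 0 ≤ i) (h1 : i < cs.length) :
    PySem.List.pyGetD cs (-i - 1) ' ' = PySem.List.pyGetD cs.reverse i ' ' := by
  obtain ⟨m, rfl⟩ : ∃ m : Nat, i = (m : Int) := ⟨i.toNat, (Int.toNat_of_nonneg h0).symm⟩
  have hmlt : m < cs.length := by exact_mod_cast h1
  have hneg : -(m : Int) - 1 = -(((m + 1 : Nat) : Int)) := by push_cast; ring
  rw [hneg, PySem.List.pyGetD_neg_natCast _ _ _ (by omega) (by omega),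
      PySem.List.pyGetD_natCast,
      List.getD_eq_getElem _ _ (by simpa using hmlt),
      List.getElem_reverse]
  congr 1
  omega

theorem oddBodyA_ne (cs : List Char) (st : Int × Int × List Char) (i : Int) (hne : i ≠ 0) :
    oddBodyA cs st i = oddStep st (PySem.List.pyGetD cs (-i - 1) ' ') := by
  simp [oddBodyA, oddStep, hne]

theorem oddNumbers_eq (s : String) : oddNumbers s = oddNumbers_alt s := by
  rcases hrev : s.toList.reverse with _ | ⟨c, t⟩
  · -- empty string
    have hnil : s.toList = [] := by simpa using congrArg List.reverse hrev
    simp [oddNumbers, oddNumbers_alt, hnil, PySem.Set.ofList]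
  · -- nonempty string; rev = c :: t
    have hlen : s.toList.length = t.length + 1 := by
      have := congrArg List.length hrev
      simpa using this
    have hpos : (0 : Int) < (s.toList.length : Int) := by
      rw [hlen]; push_cast; omega
    have hA : oddNumbers s = 5 * ffall 9 (nd [c] t) := by
      unfold oddNumbers
      rw [PySem.List.pyRange_one_cons hpos, List.foldl_cons]
      have hfirst : PySem.List.pyGetD s.toList (-1) ' ' = c := by
        have h := pyGetD_neg_rev s.toList 0 le_rfl hpos
        norm_num at h
        rw [h, hrev, PySem.List.pyGetD_zero_cons]
      have h0 : oddBodyA s.toList (1, 9, ([] : List Char)) 0 = (5, 9, [c]) := by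
        simp [oddBodyA, hfirst]
      rw [h0, show (0 : Int) + 1 = 1 from rfl]
      have hcongr := PySem.List.foldl_congr_mem (PySem.List.pyRange 1 (s.toList.length : Int) 1)
          (oddBodyA s.toList)
          (fun st i => oddStep st (PySem.List.pyGetD s.toList.reverse i ' '))
          ((5 : Int), (9 : Int), [c])
          (by
            intro acc x hx
            have hx' := (PySem.List.mem_pyRange_one).1 hx
            rw [oddBodyA_ne _ _ _ (by omega), pyGetD_neg_rev _ _ (by omega) (by omega)])
      rw [hcongr,
          show (s.toList.length : Int) = (s.toList.reverse.length : Int) from by simp,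
          PySem.List.foldl_pyRange_pyGetD' s.toList.reverse ' ' oddStep _ (by norm_num)]
      rw [hrev, show ((1 : Int).toNat) = 1 from rfl]
      rw [List.drop_succ_cons, List.drop_zero, foldl_oddStep]
    have hcard : (PySem.Set.ofList s.toList).length = nd [c] t + 1 := by
      rw [ofList_length_eq_card]
      have h : s.toList.toFinset = (c :: t).toFinset := by
        rw [← hrev]; ext x; simp
      rw [h]
      have h2 := nd_card t [c]
      simp only [List.singleton_append] at h2
      simp at h2 ⊢
      omega
    have hne : ((nd [c] t + 1 : Nat) : Int) ≠ 0 := by push_cast; omega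
    rw [hA]
    unfold oddNumbers_alt
    rw [hcard, if_neg hne,
        show ((nd [c] t + 1 : Nat) : Int) - 1 = ((nd [c] t : Nat) : Int) from by push_cast; ring,
        foldl_range_prod]

-- ===== VERDICT (by name: the statement is the Claim_ definition above) =====
theorem oddNumbers_spec : Claim_equal_oddNumbers := by
  intro s _
  show oddNumbers s = oddNumbers_alt s
  exact oddNumbers_eq s
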